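-- pv_equiv track=rewrite | github.com/ClemenceLVR/Terminator | Terminator/Main1703[Félix].py | addRelativeProp
-- ===== SOURCE A (Python) =====
-- def property_deduction2(value, prop_dico):
--     #from a value we can do a deduction of its possible property
--     #found = False
--     l_found = [] #liste des proprietes trouvees pour une valeur donnee
--     if prop_dico!={}:
--         for key in prop_dico: #parcours des cles du dico des proprietes
--             l_aux = prop_dico[key]
--             for i in range(len(l_aux)):
--                 if l_aux[i]==value: #si la valeur est trouvee dans le dictionnaire
--                     l_found.append(key) #on recupere la propriete associee
--
--     return(l_found)
--
-- def addRelativeProp(listRelativeProp, posRelativeProp, listOrgans, posOrgans, dicoRelativeProp):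
--     #recuperer la position de la valeur dans le texte, mais concatener l'organe a la propriete et pas la valeur
--     relativeProp = ''
--
--     if listRelativeProp!=[]: #si on a une valeur de prop relative trouvee dans le texte
--         for i in listRelativeProp:
--             deduc = property_deduction2(i, dicoRelativeProp)  #on deduit la prop globale associee
--             #deduc est une liste contenant les proprietes possibles pour cette valeur
--             if deduc!=[]: #si on trouve la prop relative
--                 if listOrgans!=[]: #s'il y a des organes toruves dans la liste
--                     for j in posRelativeProp: #positions des valeurs de prop relatives trouvees
--                         ind_prop = posRelativeProp.index(j)
--                         for k in posOrgans: #pour les organes trouves dans la phrase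
--                             ind_org = posOrgans.index(k) #on recupere l'indice de leur position dans la phrase
--                             if j<k and relativeProp=='': #si la prop relative se trouve avant un organe
--                                 relativeProp = deduc[0] + ' ' + listOrgans[ind_org] #alors on les associe
--                                 #la prop est composee de la prop deduite a partir de la valeur + l'organe trouve apres
--     if relativeProp!='':
--
--         return(relativeProp)
-- ===== SOURCE B (Python) =====
-- def addRelativeProp(listRelativeProp, posRelativeProp, listOrgans, posOrgans, dicoRelativeProp):
--     # Inverted index: value -> first key whose list contains it; then the first
--     # relative-prop position before max(posOrgans) and the first organ position after it.
--     val2key = {}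
--     for key, vals in dicoRelativeProp.items():
--         for v in vals:
--             val2key.setdefault(v, key)
--     prop = next((val2key[v] for v in listRelativeProp if v in val2key), None)
--     if prop is None or not listOrgans or not posOrgans:
--         return None
--     mx = max(posOrgans)
--     j = next((j for j in posRelativeProp if j < mx), None)
--     if j is None:
--         return None
--     idx = next(i for i, k in enumerate(posOrgans) if j < k)
--     return prop + ' ' + listOrgans[idx]
-- ===== Notes on version B (the rewrite author's own statement) =====
-- stated objective: faster
-- what changed: Replaces A's triple-nested loop with guard-on-leftover-state by an inverted value-to-key index built once (so property_deduction2's full dictionary scan per value disappears) plus three independent linear scans: max(posOrgans), the first posRelativeProp entry below that max, and the first organ position after it.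
import Mathlib
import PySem

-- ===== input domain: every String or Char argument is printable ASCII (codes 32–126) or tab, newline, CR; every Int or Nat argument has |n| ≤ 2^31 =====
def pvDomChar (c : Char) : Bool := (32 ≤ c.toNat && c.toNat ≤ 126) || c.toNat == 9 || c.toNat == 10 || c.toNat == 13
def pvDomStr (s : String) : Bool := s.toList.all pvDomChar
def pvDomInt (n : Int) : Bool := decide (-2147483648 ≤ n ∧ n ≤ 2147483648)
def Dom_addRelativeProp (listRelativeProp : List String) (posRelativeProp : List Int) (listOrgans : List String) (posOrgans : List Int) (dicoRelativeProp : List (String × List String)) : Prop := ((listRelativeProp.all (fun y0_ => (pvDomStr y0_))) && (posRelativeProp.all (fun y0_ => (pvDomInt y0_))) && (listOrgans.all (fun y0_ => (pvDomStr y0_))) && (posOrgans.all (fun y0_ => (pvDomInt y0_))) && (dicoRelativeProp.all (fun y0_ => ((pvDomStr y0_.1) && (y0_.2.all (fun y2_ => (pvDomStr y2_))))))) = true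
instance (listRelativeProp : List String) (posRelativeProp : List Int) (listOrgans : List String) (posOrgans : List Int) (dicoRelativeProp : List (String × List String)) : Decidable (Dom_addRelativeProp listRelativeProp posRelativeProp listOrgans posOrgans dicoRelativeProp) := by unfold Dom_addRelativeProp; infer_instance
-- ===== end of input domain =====

-- B replaces A's triple-nested loop by an inverted value->key index built once plus three
-- independent linear scans (max of posOrgans, first position below it, first organ after it);
-- same return value by two decoupled searches.
-- ===== PORT A =====
-- port of property_deduction2 (helper of A)
def property_deduction2 (value : String) (propDico : List (String × List String)) : List String :=
  let lFound : List String := []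
  if propDico ≠ [] then
    propDico.foldl (fun lFound kv =>
      let lAux := kv.2
      (PySem.List.pyRange 0 (lAux.length : Int) 1).foldl (fun lFound i =>
        if PySem.List.pyGetD lAux i "" = value then lFound ++ [kv.1] else lFound) lFound) lFound
  else lFound

def addRelativeProp (listRelativeProp : List String) (posRelativeProp : List Int) (listOrgans : List String) (posOrgans : List Int) (dicoRelativeProp : List (String × List String)) : Option String :=
  let relativeProp : String := ""
  let relativeProp :=
    if listRelativeProp ≠ [] then
      listRelativeProp.foldl (fun relativeProp i =>
        let deduc := property_deduction2 i dicoRelativeProp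
        if deduc ≠ [] then
          if listOrgans ≠ [] then
            posRelativeProp.foldl (fun relativeProp j =>
              let _indProp := PySem.List.index? posRelativeProp j
              posOrgans.foldl (fun relativeProp k =>
                let indOrg := (PySem.List.index? posOrgans k).getD 0
                if j < k ∧ relativeProp = "" then
                  -- listOrgans[ind_org] raises IndexError when out of range: excluded by Pre_
                  PySem.List.pyGetD deduc 0 "" ++ " " ++ PySem.List.pyGetD listOrgans (indOrg : Int) ""
                else relativeProp) relativeProp) relativeProp
          else relativeProp
        else relativeProp) relativeProp
    else relativeProp
  if relativeProp ≠ "" then some relativeProp else none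

-- ===== PORT B =====
def addRelativeProp_alt (listRelativeProp : List String) (posRelativeProp : List Int) (listOrgans : List String) (posOrgans : List Int) (dicoRelativeProp : List (String × List String)) : Option String :=
  -- val2key: value -> first key whose list contains it (setdefault keeps the first)
  let val2key : PySem.Dict String String :=
    dicoRelativeProp.foldl (fun m kv =>
      kv.2.foldl (fun m v => PySem.Dict.setdefault m v kv.1) m) PySem.Dict.empty
  match listRelativeProp.findSome? (fun v => PySem.Dict.get? val2key v) with
  | none => none
  | some prop =>
    if listOrgans.isEmpty || posOrgans.isEmpty then none
    else
      match PySem.List.max? posOrgans (fun x => x) with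
      | none => none
      | some mx =>
        match posRelativeProp.find? (fun j => decide (j < mx)) with
        | none => none
        | some j =>
          -- listOrgans[idx] raises IndexError when out of range: excluded by Pre_
          some (prop ++ " " ++
            PySem.List.pyGetD listOrgans ((posOrgans.findIdx (fun k => decide (j < k)) : Int)) "")

-- ===== PRECONDITION & SPEC =====
-- Pre_ excludes exactly the inputs on which Python A raises IndexError: a property is
-- deducible, listOrgans is nonempty, and the first position pair j<k points (via
-- posOrgans.index(k)) past the end of listOrgans.  (B raises there too.)
def Pre_addRelativeProp (listRelativeProp : List String) (posRelativeProp : List Int) (listOrgans : List String) (posOrgans : List Int) (dicoRelativeProp : List (String × List String)) : Prop :=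
  (listOrgans ≠ [] ∧ ∃ v ∈ listRelativeProp, ∃ p ∈ dicoRelativeProp, v ∈ p.2) →
    ((posRelativeProp.find? (fun j => posOrgans.any (fun k => decide (j < k)))).all
      (fun j => decide (posOrgans.findIdx (fun k => decide (j < k)) < listOrgans.length))) = true
instance (listRelativeProp : List String) (posRelativeProp : List Int) (listOrgans : List String) (posOrgans : List Int) (dicoRelativeProp : List (String × List String)) : Decidable (Pre_addRelativeProp listRelativeProp posRelativeProp listOrgans posOrgans dicoRelativeProp) := by unfold Pre_addRelativeProp; infer_instance

def pvWitness_addRelativeProp : List String × List Int × List String × List Int × (List (String × List String)) :=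
  (["small"], [0], ["liver"], [2], [("reduced", ["small"])])

def Spec_addRelativeProp (listRelativeProp : List String) (posRelativeProp : List Int) (listOrgans : List String) (posOrgans : List Int) (dicoRelativeProp : List (String × List String)) (out : Option String) : Prop := out = addRelativeProp_alt listRelativeProp posRelativeProp listOrgans posOrgans dicoRelativeProp
instance (listRelativeProp : List String) (posRelativeProp : List Int) (listOrgans : List String) (posOrgans : List Int) (dicoRelativeProp : List (String × List String)) (out : Option String) : Decidable (Spec_addRelativeProp listRelativeProp posRelativeProp listOrgans posOrgans dicoRelativeProp out) := by unfold Spec_addRelativeProp; infer_instance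

-- ===== CLAIM (what is proved, stated in full; the proofs are below) =====
def Claim_equal_addRelativeProp : Prop := ∀ (listRelativeProp : List String) (posRelativeProp : List Int) (listOrgans : List String) (posOrgans : List Int) (dicoRelativeProp : List (String × List String)), Dom_addRelativeProp listRelativeProp posRelativeProp listOrgans posOrgans dicoRelativeProp → Pre_addRelativeProp listRelativeProp posRelativeProp listOrgans posOrgans dicoRelativeProp → Spec_addRelativeProp listRelativeProp posRelativeProp listOrgans posOrgans dicoRelativeProp (addRelativeProp listRelativeProp posRelativeProp listOrgans posOrgans dicoRelativeProp)

-- ===== LEMMAS AND PROOFS =====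

-- the string A builds when the first pair j<k is found at k
def pvVal (listOrgans : List String) (posOrgans : List Int) (d0 : String) (k : Int) : String :=
  d0 ++ " " ++ PySem.List.pyGetD listOrgans (((PySem.List.index? posOrgans k).getD 0 : Nat) : Int) ""

lemma pvVal_ne (lo : List String) (po : List Int) (d0 : String) (k : Int) :
    pvVal lo po d0 k ≠ "" := by
  intro h
  have := congrArg String.length h
  simp [pvVal, String.length_append] at this

lemma findSome?_option_map {α β γ : Type} (l : List α) (h : α → Option β) (g : β → γ) :
    l.findSome? (fun j => (h j).map g) = (l.findSome? h).map g := by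
  induction l with
  | nil => rfl
  | cons a t ih => cases hha : h a <;> simp [hha, ih]

-- inner k-loop: a nonempty accumulator is never overwritten
lemma inner_keep (v : Int → String) (j : Int) (po : List Int) (rp : String) (h : rp ≠ "") :
    po.foldl (fun rp k => if j < k ∧ rp = "" then v k else rp) rp = rp := by
  induction po generalizing rp with
  | nil => rfl
  | cons k t ih =>
    simp only [List.foldl_cons]
    rw [if_neg (fun hc => h hc.2)]
    exact ih _ h

-- inner k-loop from the empty accumulator: first k with j<k wins
lemma inner_first (v : Int → String) (hv : ∀ k, v k ≠ "") (j : Int) (po : List Int) :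
    po.foldl (fun rp k => if j < k ∧ rp = "" then v k else rp) "" =
      ((po.find? (fun k => decide (j < k))).map v).getD "" := by
  induction po with
  | nil => rfl
  | cons k t ih =>
    simp only [List.foldl_cons, List.find?_cons]
    by_cases hjk : j < k
    · rw [if_pos ⟨hjk, by simp⟩, inner_keep v j t _ (hv k)]
      simp [hjk]
    · rw [if_neg (fun hc => hjk hc.1)]
      simpa [hjk] using ih

-- outer j-loop: preservation
lemma outer_keep (v : Int → String) (po prp : List Int) (rp : String) (h : rp ≠ "") :
    prp.foldl (fun rp j => po.foldl (fun rp k => if j < k ∧ rp = "" then v k else rp) rp) rp = rp := by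
  induction prp generalizing rp with
  | nil => rfl
  | cons j t ih =>
    simp only [List.foldl_cons]
    rw [inner_keep v j po rp h]
    exact ih _ h

-- outer j-loop from the empty accumulator: first pair j<k wins
lemma outer_first (v : Int → String) (hv : ∀ k, v k ≠ "") (prp po : List Int) :
    prp.foldl (fun rp j => po.foldl (fun rp k => if j < k ∧ rp = "" then v k else rp) rp) "" =
      ((prp.findSome? (fun j => (po.find? (fun k => decide (j < k))).map v)).getD "") := by
  induction prp with
  | nil => rfl
  | cons j t ih =>
    simp only [List.foldl_cons, List.findSome?_cons]
    rw [inner_first v hv j po]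
    cases hfk : po.find? (fun k => decide (j < k)) with
    | none => simpa using ih
    | some k =>
      simp only [Option.map_some, Option.getD_some]
      rw [outer_keep v po t _ (hv k)]

-- one key's inner occurrence loop of property_deduction2
lemma pd_inner_eq (value key : String) (l : List String) (acc : List String) :
    l.foldl (fun lF x => if x = value then lF ++ [key] else lF) acc
      = acc ++ (l.filter (fun x => x == value)).map (fun _ => key) := by
  induction l generalizing acc with
  | nil => simp
  | cons x t ih => by_cases hx : x = value <;> simp [hx, ih]

lemma pd_fold (value : String) (dico : List (String × List String)) (acc : List String) :
    dico.foldl (fun lFound kv =>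
        (PySem.List.pyRange 0 (kv.2.length : Int) 1).foldl (fun lFound i =>
          if PySem.List.pyGetD kv.2 i "" = value then lFound ++ [kv.1] else lFound) lFound) acc
      = acc ++ dico.flatMap (fun kv => ((kv.2.filter (fun x => x == value)).map (fun _ => kv.1))) := by
  induction dico generalizing acc with
  | nil => simp
  | cons kv t ih =>
    simp only [List.foldl_cons, List.flatMap_cons]
    rw [PySem.List.foldl_pyRange_zero_pyGetD' kv.2 ""
          (fun lFound x => if x = value then lFound ++ [kv.1] else lFound) acc]
    rw [pd_inner_eq, ih, List.append_assoc]

lemma pd_eq (value : String) (dico : List (String × List String)) :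
    property_deduction2 value dico
      = dico.flatMap (fun kv => ((kv.2.filter (fun x => x == value)).map (fun _ => kv.1))) := by
  unfold property_deduction2
  by_cases h : dico = []
  · simp [h]
  · rw [if_pos h, pd_fold]
    simp

lemma pd_nil_iff (value : String) (dico : List (String × List String)) :
    property_deduction2 value dico = [] ↔ dico.find? (fun kv => kv.2.contains value) = none := by
  rw [pd_eq]
  simp [List.flatMap_eq_nil_iff, List.find?_eq_none, List.filter_eq_nil_iff]
  constructor
  · intro h a b hab hv
    exact h a b hab value hv rfl
  · intro h a b hab x hx hxv
    exact h a b hab (hxv ▸ hx)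

lemma pd_head (value : String) (dico : List (String × List String)) (kv : String × List String)
    (h : dico.find? (fun kv => kv.2.contains value) = some kv) :
    PySem.List.pyGetD (property_deduction2 value dico) 0 "" = kv.1 := by
  rw [pd_eq, PySem.List.pyGetD_zero]
  induction dico with
  | nil => simp at h
  | cons kv0 t ih =>
    rw [List.find?_cons] at h
    cases hc : kv0.2.contains value
    · rw [hc] at h
      have h' : List.find? (fun kv => kv.2.contains value) t = some kv := h
      have hcm : value ∉ kv0.2 := by simpa using hc
      have hl : kv0.2.filter (fun x => x == value) = [] := by
        rw [List.filter_eq_nil_iff]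
        intro a ha hav
        have hv : a = value := by simpa using hav
        exact hcm (hv ▸ ha)
      simpa [hl] using ih h'
    · rw [hc] at h
      have h' : some kv0 = some kv := h
      obtain rfl : kv0 = kv := by simpa using h'
      have hmem : value ∈ kv0.2 := by simpa using hc
      obtain ⟨x, xs, hfe⟩ : ∃ x xs, kv0.2.filter (fun x => x == value) = x :: xs := by
        rcases hl : kv0.2.filter (fun x => x == value) with _ | ⟨x, xs⟩
        · rw [List.filter_eq_nil_iff] at hl
          exact absurd (rfl : value = value) (by simpa using hl value hmem)
        · exact ⟨x, xs, rfl⟩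
      simp [hfe]

-- the whole listRelativeProp loop: preservation
lemma top_keep (prp po : List Int) (lo : List String) (dico : List (String × List String))
    (t : List String) (rp : String) (h : rp ≠ "") :
    t.foldl (fun rp v =>
      if property_deduction2 v dico ≠ [] then
        if lo ≠ [] then
          prp.foldl (fun rp j =>
            po.foldl (fun rp k =>
              if j < k ∧ rp = "" then
                pvVal lo po (PySem.List.pyGetD (property_deduction2 v dico) 0 "") k
              else rp) rp) rp
        else rp
      else rp) rp = rp := by
  induction t generalizing rp with
  | nil => rfl
  | cons v t ih =>
    simp only [List.foldl_cons]
    by_cases hd : property_deduction2 v dico ≠ []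
    · by_cases hlo : lo ≠ []
      · rw [if_pos hd, if_pos hlo, outer_keep _ po prp rp h]
        exact ih _ h
      · rw [if_pos hd, if_neg hlo]
        exact ih _ h
    · rw [if_neg hd]
      exact ih _ h

-- the whole listRelativeProp loop from "" computes: first deduced property + first pair
lemma A_fold_eval (prp po : List Int) (lo : List String) (dico : List (String × List String))
    (hlo : lo ≠ []) (lrp : List String) :
    lrp.foldl (fun rp v =>
      if property_deduction2 v dico ≠ [] then
        if lo ≠ [] then
          prp.foldl (fun rp j =>
            po.foldl (fun rp k =>
              if j < k ∧ rp = "" then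
                pvVal lo po (PySem.List.pyGetD (property_deduction2 v dico) 0 "") k
              else rp) rp) rp
        else rp
      else rp) ""
    = (match lrp.findSome? (fun v => (dico.find? (fun kv => kv.2.contains v)).map Prod.fst) with
       | none => ""
       | some p =>
         ((prp.findSome? (fun j =>
             (po.find? (fun k => decide (j < k))).map (pvVal lo po p))).getD "")) := by
  induction lrp with
  | nil => rfl
  | cons v t ih =>
    simp only [List.foldl_cons, List.findSome?_cons]
    cases hfv : dico.find? (fun kv => kv.2.contains v) with
    | none =>
      have hd : property_deduction2 v dico = [] := (pd_nil_iff v dico).2 hfv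
      rw [if_neg (by simp [hd])]
      simpa using ih
    | some kv =>
      have hd : property_deduction2 v dico ≠ [] := by
        rw [ne_eq, pd_nil_iff, hfv]; simp
      rw [if_pos hd, if_pos hlo, pd_head v dico kv hfv,
          outer_first (pvVal lo po kv.1) (pvVal_ne lo po kv.1) prp po]
      rw [findSome?_option_map prp (fun j => po.find? (fun k => decide (j < k))) (pvVal lo po kv.1)]
      cases hq : prp.findSome? (fun j => po.find? (fun k => decide (j < k))) with
      | none =>
        simp only [Option.map_none, Option.getD_none]
        rw [ih]
        cases hft : t.findSome? (fun v => (dico.find? (fun kv => kv.2.contains v)).map Prod.fst) <;>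
          simp [findSome?_option_map, hq]
      | some k0 =>
        simp only [Option.map_some, Option.getD_some]
        rw [top_keep prp po lo dico t _ (pvVal_ne lo po kv.1 k0)]
        simp [findSome?_option_map, hq]

lemma if_ne_nil_foldl {α β : Type} (l : List α) (f : β → α → β) (b : β) :
    (if l ≠ [] then l.foldl f b else b) = l.foldl f b := by
  cases l <;> simp

-- ===== B-side lemmas =====

-- inner setdefault loop of val2key
lemma sd_inner (key : String) (vals : List String) (m : PySem.Dict String String) (v : String) :
    PySem.Dict.get? (vals.foldl (fun m x => PySem.Dict.setdefault m x key) m) v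
      = match PySem.Dict.get? m v with
        | some w => some w
        | none => if vals.contains v then some key else none := by
  induction vals generalizing m with
  | nil => cases hm : PySem.Dict.get? m v <;> simp [hm]
  | cons x t ih =>
    simp only [List.foldl_cons]
    rw [ih]
    by_cases hx : x = v
    · rw [hx, PySem.Dict.get?_setdefault_self]
      cases hm : PySem.Dict.get? m v <;> simp [hm, hx]
    · rw [PySem.Dict.get?_setdefault_of_ne m key (fun h => hx h.symm)]
      have hv : v ≠ x := fun h => hx h.symm
      cases hm : PySem.Dict.get? m v <;> simp [hm, hv]

-- the val2key fold looks up as "first key whose list contains v"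
lemma sd_outer (dico : List (String × List String)) (m : PySem.Dict String String) (v : String) :
    PySem.Dict.get? (dico.foldl (fun m kv =>
        kv.2.foldl (fun m x => PySem.Dict.setdefault m x kv.1) m) m) v
      = match PySem.Dict.get? m v with
        | some w => some w
        | none => (dico.find? (fun kv => kv.2.contains v)).map Prod.fst := by
  induction dico generalizing m with
  | nil => cases hm : PySem.Dict.get? m v <;> simp [hm]
  | cons kv t ih =>
    simp only [List.foldl_cons, List.find?_cons]
    rw [ih, sd_inner]
    cases hm : PySem.Dict.get? m v
    · cases hc : kv.2.contains v <;> simp [hm, hc]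
    · simp [hm]

lemma val2key_get (dico : List (String × List String)) (v : String) :
    PySem.Dict.get? (dico.foldl (fun m kv =>
        kv.2.foldl (fun m x => PySem.Dict.setdefault m x kv.1) m) PySem.Dict.empty) v
      = (dico.find? (fun kv => kv.2.contains v)).map Prod.fst := by
  rw [sd_outer, PySem.Dict.get?_empty]

-- no pair exists for j iff j is not below the maximum of po
lemma find_none_iff_max (po : List Int) (mx : Int) (hmx : PySem.List.max? po (fun x => x) = some mx)
    (j : Int) : po.find? (fun k => decide (j < k)) = none ↔ ¬ j < mx := by
  constructor
  · intro h hjm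
    rw [List.find?_eq_none] at h
    have := h mx (PySem.List.max?_mem hmx)
    simp at this
    omega
  · intro h
    rw [List.find?_eq_none]
    intro k hk
    have hle : k ≤ mx := PySem.List.max?_isMax hmx k hk
    simp only [decide_eq_true_eq]
    omega

-- A's first-pair search = B's "first j below max, then its first k"
lemma pair_eq (prp po : List Int) (mx : Int) (hmx : PySem.List.max? po (fun x => x) = some mx) :
    prp.findSome? (fun j => po.find? (fun k => decide (j < k)))
      = (prp.find? (fun j => decide (j < mx))).bind (fun j => po.find? (fun k => decide (j < k))) := by
  induction prp with
  | nil => rfl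
  | cons j t ih =>
    simp only [List.findSome?_cons, List.find?_cons]
    by_cases hj : j < mx
    · have hne : po.find? (fun k => decide (j < k)) ≠ none := by
        rw [ne_eq, find_none_iff_max po mx hmx j]; exact fun h => h hj
      cases hf : po.find? (fun k => decide (j < k)) with
      | none => exact absurd hf hne
      | some k => simp [hj, hf]
    · have hno : po.find? (fun k => decide (j < k)) = none :=
        (find_none_iff_max po mx hmx j).2 hj
      simp [hj, hno, ih]

-- the organ index: first occurrence of the first k>j is the first index with k>j
lemma index_eq_findIdx (j : Int) (po : List Int) (k : Int)
    (h : po.find? (fun k => decide (j < k)) = some k) :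
    (PySem.List.index? po k).getD 0 = po.findIdx (fun k => decide (j < k)) := by
  induction po with
  | nil => simp at h
  | cons x t ih =>
    by_cases hx : j < x
    · rw [List.find?_cons] at h
      simp only [hx, decide_true] at h
      obtain rfl : x = k := by simpa using h
      rw [PySem.List.index?_cons_self]
      simp [List.findIdx_cons, hx]
    · rw [List.find?_cons] at h
      simp only [hx, decide_false] at h
      have hjk : j < k := by simpa using List.find?_some h
      have hmem : k ∈ t := List.mem_of_find?_eq_some h
      have hxk : x ≠ k := by intro he; subst he; exact hx hjk
      rw [PySem.List.index?_cons_of_ne _ hxk]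
      obtain ⟨n, hn⟩ := Option.isSome_iff_exists.1 ((PySem.List.index?_isSome_iff t k).2 hmem)
      rw [hn]
      have := ih h
      rw [hn] at this
      simp only [Option.map_some, Option.getD_some] at this ⊢
      simp [List.findIdx_cons, hx, ← this]

-- B evaluated to the same canonical form as A (lo and po nonempty)
lemma B_eval (lrp : List String) (prp : List Int) (lo : List String) (po : List Int)
    (dico : List (String × List String)) (hlo : lo ≠ []) :
    addRelativeProp_alt lrp prp lo po dico
    = (match lrp.findSome? (fun v => (dico.find? (fun kv => kv.2.contains v)).map Prod.fst) with
       | none => none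
       | some p =>
         ((prp.findSome? (fun j => po.find? (fun k => decide (j < k)))).map (pvVal lo po p))) := by
  unfold addRelativeProp_alt
  simp only [val2key_get]
  cases hp : lrp.findSome? (fun v => (dico.find? (fun kv => kv.2.contains v)).map Prod.fst) with
  | none => rfl
  | some p =>
    simp only []
    by_cases hpo : po = []
    · subst hpo
      rw [if_pos (by simp)]
      have : prp.findSome? (fun j => ([] : List Int).find? (fun k => decide (j < k))) = none := by
        induction prp with
        | nil => rfl
        | cons j t ih => simpa using ih
      rw [this]; rfl
    · rw [if_neg (by simp [hlo, hpo])]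
      obtain ⟨mx, hmx⟩ : ∃ mx, PySem.List.max? po (fun x => x) = some mx := by
        cases hq : PySem.List.max? po (fun x => x) with
        | none => exact absurd ((PySem.List.max?_eq_none_iff po (fun x => x)).1 hq) hpo
        | some m => exact ⟨m, rfl⟩
      rw [hmx, pair_eq prp po mx hmx]
      simp only []
      cases hj : prp.find? (fun j => decide (j < mx)) with
      | none => simp
      | some j =>
        simp only [Option.bind_some]
        have hne : po.find? (fun k => decide (j < k)) ≠ none := by
          rw [ne_eq, find_none_iff_max po mx hmx j]
          have : j < mx := by simpa using List.find?_some hj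
          exact fun h => h this
        cases hf : po.find? (fun k => decide (j < k)) with
        | none => exact absurd hf hne
        | some k =>
          simp only [Option.map_some]
          rw [pvVal, ← index_eq_findIdx j po k hf]

-- ===== VERDICT (by name: the statement is the Claim_ definition above) =====
theorem addRelativeProp_spec : Claim_equal_addRelativeProp := by
  intro lrp prp lo po dico _hdom _hpre
  show addRelativeProp lrp prp lo po dico = addRelativeProp_alt lrp prp lo po dico
  clear _hdom _hpre
  by_cases hlo : lo = []
  · subst hlo
    have hz : addRelativeProp lrp prp [] po dico = none := by
      unfold addRelativeProp
      simp only [if_ne_nil_foldl]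
      have : lrp.foldl (fun rp v =>
          if property_deduction2 v dico ≠ [] then
            if ([] : List String) ≠ [] then
              prp.foldl (fun rp j =>
                po.foldl (fun rp k =>
                  if j < k ∧ rp = "" then
                    pvVal [] po (PySem.List.pyGetD (property_deduction2 v dico) 0 "") k
                  else rp) rp) rp
            else rp
          else rp) "" = "" := by
        induction lrp with
        | nil => rfl
        | cons v t ih =>
          simp only [List.foldl_cons]
          by_cases hd : property_deduction2 v dico ≠ []
          · rw [if_pos hd, if_neg (by simp)]
            exact ih
          · rw [if_neg hd]
            exact ih
      exact if_neg (fun hne => hne this)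
    rw [hz]
    unfold addRelativeProp_alt
    simp only [val2key_get]
    cases lrp.findSome? (fun v => (dico.find? (fun kv => kv.2.contains v)).map Prod.fst) <;> simp
  · have hA : addRelativeProp lrp prp lo po dico
        = (if (lrp.foldl (fun rp v =>
      if property_deduction2 v dico ≠ [] then
        if lo ≠ [] then
          prp.foldl (fun rp j =>
            po.foldl (fun rp k =>
              if j < k ∧ rp = "" then
                pvVal lo po (PySem.List.pyGetD (property_deduction2 v dico) 0 "") k
              else rp) rp) rp
        else rp
      else rp) "") ≠ "" then some (lrp.foldl (fun rp v =>
      if property_deduction2 v dico ≠ [] then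
        if lo ≠ [] then
          prp.foldl (fun rp j =>
            po.foldl (fun rp k =>
              if j < k ∧ rp = "" then
                pvVal lo po (PySem.List.pyGetD (property_deduction2 v dico) 0 "") k
              else rp) rp) rp
        else rp
      else rp) "") else none) := by
      unfold addRelativeProp
      simp only [if_ne_nil_foldl]
      rfl
    rw [hA, A_fold_eval prp po lo dico hlo lrp, B_eval lrp prp lo po dico hlo]
    cases hp : lrp.findSome? (fun v => (dico.find? (fun kv => kv.2.contains v)).map Prod.fst) with
    | none => simp
    | some p =>
      simp only []
      rw [findSome?_option_map prp (fun j => po.find? (fun k => decide (j < k))) (pvVal lo po p)]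
      cases hq : prp.findSome? (fun j => po.find? (fun k => decide (j < k))) with
      | none => simp
      | some k0 => simp [pvVal_ne lo po p k0]
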